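-- pv_equiv track=rewrite | github.com/yunsxx/featureExtraction | preprocess_phishing_site_urls.py | getNodelist
-- ===== SOURCE A (Python) =====
-- def getNodelist(domain):
--     NodeList = []
--     cur_domain = ""
--     count = 0
--
--     for i in reversed(domain):
--         if i == None:
--             continue
--
--         if count == 0:
--             cur_domain = i
--             NodeList.append(cur_domain)
--             count += 1
--         elif count != 0:
--             cur_domain = i + "." + cur_domain
--             NodeList.append(cur_domain)
--             count += 1
--
--
--     return NodeList
-- ===== SOURCE B (Python) =====
-- def getNodelist(domain):
--     # Different algorithm: join everything once, then emit each cumulative suffix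
--     # as a substring of the precomputed full join (no repeated concatenation).
--     full = ".".join(domain)
--     out = []
--     pos = len(full)
--     for lab in reversed(domain):
--         pos -= len(lab)
--         out.append(full[pos:])
--         pos -= 1
--     return out
-- ===== Notes on version B (the rewrite author's own statement) =====
-- stated objective: alternative
-- what changed: Instead of growing cur_domain by repeated concatenation and appending it at each step, B computes the full '.'-join once, tracks a position from the end, and emits every cumulative suffix as a substring slice of that precomputed string.
import Mathlib
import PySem

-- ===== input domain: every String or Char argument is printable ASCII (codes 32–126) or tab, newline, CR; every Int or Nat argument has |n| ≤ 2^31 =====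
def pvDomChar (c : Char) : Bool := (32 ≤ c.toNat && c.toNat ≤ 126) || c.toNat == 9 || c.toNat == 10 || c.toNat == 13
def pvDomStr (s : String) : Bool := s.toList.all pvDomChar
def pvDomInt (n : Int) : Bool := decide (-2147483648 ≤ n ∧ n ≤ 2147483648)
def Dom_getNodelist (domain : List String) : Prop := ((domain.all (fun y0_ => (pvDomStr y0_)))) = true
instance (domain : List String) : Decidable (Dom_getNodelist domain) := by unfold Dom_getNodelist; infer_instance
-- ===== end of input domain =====

-- B joins the whole list once and emits each cumulative suffix as a substring slice of
-- that precomputed full join, instead of A's repeated string concatenation.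

-- ===== PORT A =====
-- one loop iteration of A: state = (NodeList, cur_domain, count).
-- A's 'if i == None: continue' branch cannot fire here: the list elements are String, never None.
def getNodelistStep (st : List String × String × Int) (i : String) : List String × String × Int :=
  if st.2.2 = 0 then
    (st.1 ++ [i], i, st.2.2 + 1)
  else
    (st.1 ++ [i ++ "." ++ st.2.1], i ++ "." ++ st.2.1, st.2.2 + 1)

def getNodelist (domain : List String) : List String :=
  (domain.reverse.foldl getNodelistStep ([], "", 0)).1

-- ===== PORT B =====
-- one step of B's loop: state = (out, pos); appends full[pos - len(lab):], steps pos past lab and the '.'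
def getNodelistAltStep (full : String) (st : List String × Int) (lab : String) :
    List String × Int :=
  (st.1 ++ [PySem.Str.slice full (some (st.2 - PySem.Str.len lab)) none],
   st.2 - PySem.Str.len lab - 1)

def getNodelist_alt (domain : List String) : List String :=
  let full := PySem.Str.join "." domain
  (domain.reverse.foldl (getNodelistAltStep full) ([], PySem.Str.len full)).1

-- ===== PRECONDITION & SPEC =====
def Spec_getNodelist (domain : List String) (out : List String) : Prop := out = getNodelist_alt domain
instance (domain : List String) (out : List String) : Decidable (Spec_getNodelist domain out) := by unfold Spec_getNodelist; infer_instance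

-- ===== CLAIM (what is proved, stated in full; the proofs are below) =====
def Claim_equal_getNodelist : Prop := ∀ (domain : List String), Dom_getNodelist domain → Spec_getNodelist domain (getNodelist domain)

-- ===== LEMMAS AND PROOFS =====

-- reference value: the cumulative suffix list, built back-to-front
def pvSuffixes : List String → List String
  | [] => []
  | x :: xs => pvSuffixes xs ++ [PySem.Str.join "." (x :: xs)]

theorem pvJoin_single (x : String) : PySem.Str.join "." [x] = x := by
  apply String.ext; simp [PySem.Str.toList_join, PySem.Chars.join_singleton]

theorem pvJoin_cons (x : String) (xs : List String) (h : xs ≠ []) :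
    PySem.Str.join "." (x :: xs) = x ++ "." ++ PySem.Str.join "." xs := by
  cases xs with
  | nil => exact absurd rfl h
  | cons y ys =>
    apply String.ext
    simp [pysem, PySem.Chars.join_cons_cons]

-- invariant of A's loop: after consuming l.reverse the state is
-- (suffix list of l, '.'-join of l, length of l)
theorem pvA_state (l : List String) :
    l.reverse.foldl getNodelistStep ([], "", 0) =
      (pvSuffixes l, PySem.Str.join "." l, (l.length : Int)) := by
  induction l with
  | nil =>
    simp only [List.reverse_nil, List.foldl_nil, pvSuffixes, List.length_nil, Nat.cast_zero]
    refine congrArg (fun s => (([]:List String), s, (0:Int))) ?_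
    apply String.ext; simp [PySem.Str.toList_join, PySem.Chars.join_nil]
  | cons x xs ih =>
    rw [List.reverse_cons, List.foldl_append, ih]
    cases xs with
    | nil =>
      simp only [List.foldl_cons, List.foldl_nil, getNodelistStep, pvSuffixes, List.length_nil,
        Nat.cast_zero, List.nil_append, List.length_cons, if_true]
      rw [pvJoin_single]
      norm_num
    | cons y ys =>
      simp only [List.foldl_cons, List.foldl_nil, getNodelistStep]
      rw [if_neg (by simp; omega)]
      simp only [pvSuffixes, pvJoin_cons x (y :: ys) (by simp), List.length_cons,
        List.append_assoc]
      refine Prod.ext rfl (Prod.ext rfl ?_)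
      push_cast; ring

-- B-side facts: full-join suffixes
def pvJ (l : List String) : List Char := PySem.Chars.join ['.'] (l.map String.toList)

theorem pvJ_toList (l : List String) : (PySem.Str.join "." l).toList = pvJ l := by
  rw [PySem.Str.toList_join]; rfl

theorem pvJ_cons (x y : String) (ys : List String) :
    pvJ (x :: y :: ys) = x.toList ++ '.' :: pvJ (y :: ys) := by
  unfold pvJ
  simp only [List.map_cons, PySem.Chars.join_cons_cons]
  simp

theorem pvSlice_from (s : String) (a : Nat) :
    (PySem.Str.slice s (some (a : Int)) none).toList = s.toList.drop a := by
  rw [PySem.Str.toList_slice]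
  unfold PySem.Chars.slice
  rw [PySem.List.slice_from_natCast]

-- the suffix slice at position pre.length IS the '.'-join of l
theorem pvSlice_eq_join (full : String) (pre : List Char) (l : List String)
    (hfull : full.toList = pre ++ pvJ l) :
    PySem.Str.slice full (some ((pre.length : Nat) : Int)) none = PySem.Str.join "." l := by
  apply String.ext
  rw [pvSlice_from, hfull, List.drop_append, pvJ_toList]
  simp

theorem pvInv (full : String) (pre : List Char) (l : List String) (out0 : List String)
    (hl : l ≠ []) (hfull : full.toList = pre ++ pvJ l) :
    l.reverse.foldl (getNodelistAltStep full) (out0, (pre.length : Int) + ((pvJ l).length : Int)) =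
      (out0 ++ pvSuffixes l, (pre.length : Int) - 1) := by
  induction l generalizing pre out0 with
  | nil => exact absurd rfl hl
  | cons x xs ih =>
    rw [List.reverse_cons, List.foldl_append]
    cases xs with
    | nil =>
      simp only [List.reverse_nil, List.foldl_nil, List.foldl_cons, getNodelistAltStep,
        pvSuffixes, List.nil_append]
      have hJ : pvJ [x] = x.toList := PySem.Chars.join_singleton ['.'] x.toList
      have hlen : (pre.length : Int) + ((pvJ [x]).length : Int) - PySem.Str.len x =
          ((pre.length : Nat) : Int) := by rw [PySem.Str.len_eq, hJ]; omega
      rw [hlen, pvSlice_eq_join full pre [x] hfull]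
    | cons y ys =>
      have hfull' : full.toList = (pre ++ x.toList ++ ['.']) ++ pvJ (y :: ys) := by
        rw [hfull, pvJ_cons]; simp
      have hpos : (pre.length : Int) + ((pvJ (x :: y :: ys)).length : Int) =
          (((pre ++ x.toList ++ ['.']).length : Nat) : Int) + ((pvJ (y :: ys)).length : Int) := by
        rw [pvJ_cons]; simp; ring
      rw [hpos, ih (pre ++ x.toList ++ ['.']) out0 (by simp) hfull']
      simp only [List.foldl_cons, List.foldl_nil, getNodelistAltStep]
      have hstart : (((pre ++ x.toList ++ ['.']).length : Nat) : Int) - 1 - PySem.Str.len x =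
          ((pre.length : Nat) : Int) := by
        rw [PySem.Str.len_eq]; simp; ring
      rw [hstart, pvSlice_eq_join full pre (x :: y :: ys) hfull]
      exact Prod.ext (by simp [pvSuffixes]) rfl

theorem pvB_eq_suffixes (l : List String) : getNodelist_alt l = pvSuffixes l := by
  cases l with
  | nil => rfl
  | cons x xs =>
    unfold getNodelist_alt
    simp only []
    have h1 : PySem.Str.len (PySem.Str.join "." (x :: xs)) =
        ((([] : List Char).length : Int)) + ((pvJ (x :: xs)).length : Int) := by
      rw [PySem.Str.len_eq, pvJ_toList]; simp
    have h2 : (PySem.Str.join "." (x :: xs)).toList = ([] : List Char) ++ pvJ (x :: xs) := by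
      rw [pvJ_toList]; rfl
    rw [h1, pvInv _ [] (x :: xs) [] (by simp) h2]
    simp

-- ===== VERDICT (by name: the statement is the Claim_ definition above) =====
theorem getNodelist_spec : Claim_equal_getNodelist := by
  intro domain _
  unfold Spec_getNodelist getNodelist
  rw [pvA_state, pvB_eq_suffixes]
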